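-- pv_equiv track=rewrite | github.com/YiseBoge/CompetitiveProgramming | CodeForce/Contest/A2SV Custom Contests/A2SV11/G.py | sleep_well
-- ===== SOURCE A (Python) =====
-- def sleep_well(hours, n, h, l, r):
--     memory = [[0] * h for _ in range(n + 1)]
--     for ind in range(n - 1, -1, -1):
--         for time in range(h):
--             for addable in (hours[ind], hours[ind] - 1):
--                 new_time = (time + addable) % h
--                 res = l <= new_time <= r
--                 memory[ind][time] = max(memory[ind][time], memory[ind + 1][new_time] + res)
--     return memory[0][0]
-- ===== SOURCE B (Python) =====
-- def sleep_well(hours, n, h, l, r):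
--     # Forward DP over the number k of "sleep one hour less" choices made so far:
--     # after i steps the wake-up time is (sum(hours[:i]) - k) % h, so k is the whole state.
--     good = [1 if l <= t <= r else 0 for t in range(h)]
--     dp = [0] * (n + 1)  # dp[k] = best wake-up count so far with exactly k reductions
--     pref = 0
--     for i in range(n):
--         pref += hours[i]
--         for k in range(i + 1, 0, -1):
--             dp[k] = max(dp[k - 1], dp[k]) + good[(pref - k) % h]
--         dp[0] += good[pref % h]
--     return max(dp)
-- ===== Notes on version B (the rewrite author's own statement) =====
-- stated objective: alternative
-- what changed: A fills a backward (n+1) x h table over all clock times; B runs a forward in-place 1-D DP whose state is only the number k of 'sleep one hour less' choices made so far (the clock time is determined as (prefix_sum - k) mod h), with a precomputed good-slot table.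
import Mathlib
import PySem

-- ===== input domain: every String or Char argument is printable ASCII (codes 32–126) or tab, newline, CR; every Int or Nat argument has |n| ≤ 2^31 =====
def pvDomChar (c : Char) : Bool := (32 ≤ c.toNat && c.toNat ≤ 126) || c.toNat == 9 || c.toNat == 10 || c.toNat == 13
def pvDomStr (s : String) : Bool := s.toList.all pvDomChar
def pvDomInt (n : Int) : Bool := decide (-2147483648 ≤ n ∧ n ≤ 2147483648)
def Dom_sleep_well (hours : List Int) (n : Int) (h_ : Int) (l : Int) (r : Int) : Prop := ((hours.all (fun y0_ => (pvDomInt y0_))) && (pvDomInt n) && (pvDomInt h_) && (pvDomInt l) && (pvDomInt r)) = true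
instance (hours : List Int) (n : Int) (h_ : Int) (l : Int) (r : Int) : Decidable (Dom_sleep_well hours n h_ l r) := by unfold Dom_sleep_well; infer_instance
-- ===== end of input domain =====

-- B replaces A's backward table over all h clock times by a forward DP whose state is the
-- number k of "sleep one hour less" choices made so far (time ≡ prefix-sum − k mod h).

-- ===== PORT A =====
-- memory[i][t] double read/write; indices are nonnegative here, pyGetD/pySetD are exact under Pre_.
def pvGet2 (m : List (List Int)) (i j : Int) : Int :=
  PySem.List.pyGetD (PySem.List.pyGetD m i ([] : List Int)) j 0

def pvSet2 (m : List (List Int)) (i j : Int) (v : Int) : List (List Int) :=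
  PySem.List.pySetD m i (PySem.List.pySetD (PySem.List.pyGetD m i ([] : List Int)) j v)

def sleep_well (hours : List Int) (n : Int) (h_ : Int) (l : Int) (r : Int) : Int :=
  let memory : List (List Int) :=
    (PySem.List.pyRange 0 (n + 1) 1).map (fun _ => PySem.List.pyRepeat [(0 : Int)] h_)
  let memory :=
    (PySem.List.pyRange (n - 1) (-1) (-1)).foldl (fun memory ind =>
      (PySem.List.pyRange 0 h_ 1).foldl (fun memory time =>
        [PySem.List.pyGetD hours ind 0, PySem.List.pyGetD hours ind 0 - 1].foldl (fun memory addable =>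
          let new_time := PySem.Int.mod (time + addable) h_
          let res : Int := if l ≤ new_time ∧ new_time ≤ r then 1 else 0
          pvSet2 memory ind time
            (max (pvGet2 memory ind time) (pvGet2 memory (ind + 1) new_time + res)))
          memory)
        memory)
      memory
  pvGet2 memory 0 0

-- ===== PORT B =====
def sleep_well_alt (hours : List Int) (n : Int) (h_ : Int) (l : Int) (r : Int) : Int :=
  let good := (PySem.List.pyRange 0 h_ 1).map (fun t => if l ≤ t ∧ t ≤ r then (1 : Int) else 0)
  let st :=
    (PySem.List.pyRange 0 n 1).foldl (fun (st : Int × List Int) i =>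
      let pref := st.1 + PySem.List.pyGetD hours i 0
      let dp := (PySem.List.pyRange (i + 1) 0 (-1)).foldl (fun dp k =>
          PySem.List.pySetD dp k
            (max (PySem.List.pyGetD dp (k - 1) 0) (PySem.List.pyGetD dp k 0)
              + PySem.List.pyGetD good (PySem.Int.mod (pref - k) h_) 0)) st.2
      let dp := PySem.List.pySetD dp 0
          (PySem.List.pyGetD dp 0 0 + PySem.List.pyGetD good (PySem.Int.mod pref h_) 0)
      (pref, dp))
      ((0 : Int), PySem.List.pyRepeat [(0 : Int)] (n + 1))
  (PySem.List.max? st.2 (fun x => x)).getD 0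

-- ===== PRECONDITION & SPEC =====
-- Exactly the inputs on which A returns: h ≥ 1 (else [0]*h is empty / % raises) and 0 ≤ n ≤ len(hours)
-- (else memory[0][0] or hours[ind] raises IndexError).
def Pre_sleep_well (hours : List Int) (n : Int) (h_ : Int) (l : Int) (r : Int) : Prop :=
  1 ≤ h_ ∧ 0 ≤ n ∧ n ≤ hours.length

instance (hours : List Int) (n : Int) (h_ : Int) (l : Int) (r : Int) : Decidable (Pre_sleep_well hours n h_ l r) := by
  unfold Pre_sleep_well; infer_instance

def pvWitness_sleep_well : List Int × Int × Int × Int × Int := ([2, 3, 5], 3, 4, 1, 2)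

def Spec_sleep_well (hours : List Int) (n : Int) (h_ : Int) (l : Int) (r : Int) (out : Int) : Prop := out = sleep_well_alt hours n h_ l r
instance (hours : List Int) (n : Int) (h_ : Int) (l : Int) (r : Int) (out : Int) : Decidable (Spec_sleep_well hours n h_ l r out) := by unfold Spec_sleep_well; infer_instance

-- ===== CLAIM (what is proved, stated in full; the proofs are below) =====
def Claim_equal_sleep_well : Prop := ∀ (hours : List Int) (n : Int) (h_ : Int) (l : Int) (r : Int), Dom_sleep_well hours n h_ l r → Pre_sleep_well hours n h_ l r → Spec_sleep_well hours n h_ l r (sleep_well hours n h_ l r)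

-- ===== LEMMAS AND PROOFS =====

-- The common value function: pvG h l r s t = best number of wake-ups in [l,r] over the remaining
-- sleep list s, starting at clock time t.
def pvR (l r t : Int) : Int := if l ≤ t ∧ t ≤ r then 1 else 0

def pvG (h l r : Int) : List Int → Int → Int
  | [], _ => 0
  | a :: rest, t =>
      max (pvG h l r rest (PySem.Int.mod (t + a) h) + pvR l r (PySem.Int.mod (t + a) h))
          (pvG h l r rest (PySem.Int.mod (t + (a - 1)) h) + pvR l r (PySem.Int.mod (t + (a - 1)) h))

theorem pvR_nonneg (l r t : Int) : 0 ≤ pvR l r t := by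
  unfold pvR; split <;> omega

theorem pvG_nonneg (h l r : Int) (s : List Int) (t : Int) : 0 ≤ pvG h l r s t := by
  induction s generalizing t with
  | nil => simp [pvG]
  | cons a rest ih =>
      have h1 := ih (PySem.Int.mod (t + a) h)
      have h2 := pvR_nonneg l r (PySem.Int.mod (t + a) h)
      simp [pvG]
      left; omega

-- mod composition (h positive)
theorem pv_mod_add (h x c : Int) (hh : 1 ≤ h) :
    PySem.Int.mod (PySem.Int.mod x h + c) h = PySem.Int.mod (x + c) h := by
  simp only [PySem.Int.mod_eq_emod_of_pos (show (0:Int) < h by omega)]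
  exact Int.emod_add_emod x h c

-- ---------- A side ----------

def pvZRow (H : Nat) : List Int := List.replicate H 0
def pvGRow (h l r : Int) (s : List Int) (H : Nat) : List Int :=
  (List.range H).map (fun (t : Nat) => pvG h l r s (t : Int))
def pvPRow (h l r : Int) (s : List Int) (H t : Nat) : List Int :=
  (List.range H).map (fun u => if u < t then pvG h l r s (u : Int) else (0 : Int))
def pvTab (h l r : Int) (L : List Int) (H j : Nat) : List (List Int) :=
  (List.range (L.length + 1)).map (fun i => if j ≤ i then pvGRow h l r (L.drop i) H else pvZRow H)
def pvTabP (h l r : Int) (L : List Int) (H j t : Nat) : List (List Int) :=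
  (List.range (L.length + 1)).map
    (fun i => if i = j then pvPRow h l r (L.drop j) H t
      else if j + 1 ≤ i then pvGRow h l r (L.drop i) H else pvZRow H)

theorem pv_set_map_range {α : Type} (m i : Nat) (f : Nat → α) (v : α) (hi : i < m) :
    ((List.range m).map f).set i v = (List.range m).map (fun x => if x = i then v else f x) := by
  apply List.ext_getElem
  · simp
  · intro k hk1 hk2
    simp only [List.getElem_set, List.getElem_map, List.getElem_range]
    by_cases hki : k = i
    · subst hki; simp
    · simp [hki, Ne.symm hki]

theorem pvTabP_zero (h l r : Int) (L : List Int) (H j : Nat) :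
    pvTabP h l r L H j 0 = pvTab h l r L H (j + 1) := by
  unfold pvTabP pvTab
  apply List.map_congr_left
  intro i _
  by_cases hij : i = j
  · subst hij
    rw [if_pos rfl, if_neg (show ¬ i + 1 ≤ i by omega)]
    unfold pvPRow pvZRow
    simp [List.map_const']
  · rw [if_neg hij]

theorem pvTabP_top (h l r : Int) (L : List Int) (H j : Nat) :
    pvTabP h l r L H j H = pvTab h l r L H j := by
  unfold pvTabP pvTab
  apply List.map_congr_left
  intro i _
  by_cases hij : i = j
  · subst hij
    rw [if_pos rfl, if_pos (le_refl i)]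
    unfold pvPRow pvGRow
    apply List.map_congr_left
    intro u hu
    simp only [List.mem_range] at hu
    simp [hu]
  · rw [if_neg hij]
    by_cases hji : j + 1 ≤ i
    · rw [if_pos hji, if_pos (by omega)]
    · rw [if_neg hji, if_neg (by omega)]


theorem pvGRow_nil (h l r : Int) (H : Nat) : pvGRow h l r [] H = pvZRow H := by
  unfold pvGRow pvZRow
  simp [pvG, List.map_const']

theorem pvGet2_map_range (F : Nat → List Int) (m j : Nat) (u : Int) (hj : j < m) :
    pvGet2 ((List.range m).map F) (j : Int) u = PySem.List.pyGetD (F j) u 0 := by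
  unfold pvGet2
  rw [PySem.List.pyGetD_natCast, PySem.List.getD_map_range F m j [] hj]

theorem pvSet2_map_range (F : Nat → List Int) (m j t : Nat) (v : Int) (hj : j < m) :
    pvSet2 ((List.range m).map F) (j : Int) (t : Int) v
      = (List.range m).map (fun i => if i = j then (F j).set t v else F i) := by
  unfold pvSet2
  rw [PySem.List.pyGetD_natCast, PySem.List.getD_map_range F m j [] hj,
    PySem.List.pySetD_natCast, PySem.List.pySetD_natCast, pv_set_map_range m j F _ hj]

theorem pvPRow_getD (h l r : Int) (s : List Int) (H t u : Nat) (hu : u < H) :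
    PySem.List.pyGetD (pvPRow h l r s H t) (u : Int) 0
      = if u < t then pvG h l r s (u : Int) else 0 := by
  unfold pvPRow
  rw [PySem.List.pyGetD_natCast, PySem.List.getD_map_range _ H u 0 hu]

theorem pvGRow_getD (h l r : Int) (s : List Int) (H : Nat) (u : Int)
    (hu0 : 0 ≤ u) (hu : u < (H : Int)) :
    PySem.List.pyGetD (pvGRow h l r s H) u 0 = pvG h l r s u := by
  unfold pvGRow
  rw [PySem.List.pyGetD_eq_getElem _ 0 hu0 (by simpa using hu)]
  simp only [List.getElem_map, List.getElem_range]
  congr 1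
  omega

theorem pvPRow_set (h l r : Int) (s : List Int) (H t : Nat) (ht : t < H) :
    (pvPRow h l r s H t).set t (pvG h l r s (t : Int)) = pvPRow h l r s H (t + 1) := by
  unfold pvPRow
  rw [pv_set_map_range H t _ _ ht]
  apply List.map_congr_left
  intro u _
  by_cases hut : u = t
  · subst hut; simp
  · rw [if_neg hut]
    by_cases h1 : u < t
    · rw [if_pos h1, if_pos (by omega)]
    · rw [if_neg h1, if_neg (by omega)]

theorem pv_val (h l r a t : Int) (s : List Int) :
    max (max 0 (pvG h l r s (PySem.Int.mod (t + a) h) + pvR l r (PySem.Int.mod (t + a) h)))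
        (pvG h l r s (PySem.Int.mod (t + (a - 1)) h) + pvR l r (PySem.Int.mod (t + (a - 1)) h))
      = pvG h l r (a :: s) t := by
  have h1 := pvG_nonneg h l r s (PySem.Int.mod (t + a) h)
  have h2 := pvR_nonneg l r (PySem.Int.mod (t + a) h)
  simp only [pvG]
  omega

theorem pv_getD_set_self (row : List Int) (t : Nat) (v : Int) (ht : t < row.length) :
    PySem.List.pyGetD (row.set t v) (t : Int) 0 = v := by
  rw [PySem.List.pyGetD_natCast, List.getD_eq_getElem _ _ (by simpa using ht), List.getElem_set]
  simp

theorem pvStepTime (h l r : Int) (hours L : List Int) (H j t : Nat)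
    (hj : j < L.length) (ht : t < H) (hH : (H : Int) = h)
    (ha : PySem.List.pyGetD hours (j : Int) 0 = L[j]) :
    [PySem.List.pyGetD hours (j : Int) 0, PySem.List.pyGetD hours (j : Int) 0 - 1].foldl
      (fun memory addable =>
        let new_time := PySem.Int.mod ((t : Int) + addable) h
        let res : Int := if l ≤ new_time ∧ new_time ≤ r then 1 else 0
        pvSet2 memory (j : Int) (t : Int)
          (max (pvGet2 memory (j : Int) (t : Int)) (pvGet2 memory ((j : Int) + 1) new_time + res)))
      (pvTabP h l r L H j t)
    = pvTabP h l r L H j (t + 1) := by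
  have hH1 : 1 ≤ H := by omega
  have hh : (0 : Int) < h := by rw [← hH]; exact_mod_cast hH1
  have hjm : j < L.length + 1 := by omega
  have hTP : pvTabP h l r L H j t = (List.range (L.length + 1)).map
      (fun i => if i = j then pvPRow h l r (L.drop j) H t
        else if j + 1 ≤ i then pvGRow h l r (L.drop i) H else pvZRow H) := rfl
  have hTP1 : pvTabP h l r L H j (t + 1) = (List.range (L.length + 1)).map
      (fun i => if i = j then pvPRow h l r (L.drop j) H (t + 1)
        else if j + 1 ≤ i then pvGRow h l r (L.drop i) H else pvZRow H) := rfl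
  rw [ha]
  simp only [List.foldl_cons, List.foldl_nil]
  rw [hTP, hTP1]
  -- first write
  rw [pvGet2_map_range _ _ _ _ hjm]
  simp only [if_true]
  rw [pvPRow_getD h l r _ H t t ht, if_neg (lt_irrefl t)]
  have hcast : ((j : Int) + 1) = ((j + 1 : Nat) : Int) := by push_cast; ring
  rw [hcast, pvGet2_map_range _ _ _ _ (show j + 1 < L.length + 1 by omega)]
  simp only [if_neg (show ¬ j + 1 = j by omega), if_pos (le_refl (j + 1))]
  rw [pvGRow_getD h l r _ H _ (PySem.Int.mod_nonneg _ hh) (by rw [hH]; exact PySem.Int.mod_lt _ hh)]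
  rw [pvSet2_map_range _ _ _ t _ hjm]
  simp only [if_true]
  -- second write
  rw [pvGet2_map_range _ _ _ _ hjm]
  simp only [if_true]
  rw [pv_getD_set_self _ t _ (by unfold pvPRow; simpa using ht)]
  rw [pvGet2_map_range _ _ _ _ (show j + 1 < L.length + 1 by omega)]
  simp only [if_neg (show ¬ j + 1 = j by omega), if_pos (le_refl (j + 1))]
  rw [pvGRow_getD h l r _ H _ (PySem.Int.mod_nonneg _ hh) (by rw [hH]; exact PySem.Int.mod_lt _ hh)]
  rw [pvSet2_map_range _ _ _ t _ hjm]
  simp only [if_true, List.set_set]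
  -- final table equality
  apply List.map_congr_left
  intro i _
  by_cases hij : i = j
  · subst hij
    rw [if_pos rfl, if_pos rfl]
    have hval : max (max 0 (pvG h l r (L.drop (i + 1)) (PySem.Int.mod ((t : Int) + L[i]) h)
          + (if l ≤ PySem.Int.mod ((t : Int) + L[i]) h ∧ PySem.Int.mod ((t : Int) + L[i]) h ≤ r then (1 : Int) else 0)))
        (pvG h l r (L.drop (i + 1)) (PySem.Int.mod ((t : Int) + (L[i] - 1)) h)
          + (if l ≤ PySem.Int.mod ((t : Int) + (L[i] - 1)) h ∧ PySem.Int.mod ((t : Int) + (L[i] - 1)) h ≤ r then (1 : Int) else 0))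
        = pvG h l r (L.drop i) (t : Int) := by
      rw [show (if l ≤ PySem.Int.mod ((t : Int) + L[i]) h ∧ PySem.Int.mod ((t : Int) + L[i]) h ≤ r then (1 : Int) else 0)
          = pvR l r (PySem.Int.mod ((t : Int) + L[i]) h) from rfl,
        show (if l ≤ PySem.Int.mod ((t : Int) + (L[i] - 1)) h ∧ PySem.Int.mod ((t : Int) + (L[i] - 1)) h ≤ r then (1 : Int) else 0)
          = pvR l r (PySem.Int.mod ((t : Int) + (L[i] - 1)) h) from rfl,
        pv_val h l r L[i] (t : Int) (L.drop (i + 1)), List.getElem_cons_drop hj]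
    rw [hval, pvPRow_set h l r _ H t ht]
  · simp [hij]

theorem pvInnerFold (h l r : Int) (hours L : List Int) (H j : Nat)
    (hj : j < L.length) (hH : (H : Int) = h)
    (ha : PySem.List.pyGetD hours (j : Int) 0 = L[j]) :
    ∀ t, t ≤ H →
    (PySem.List.pyRange (t : Int) h 1).foldl
      (fun memory time =>
        [PySem.List.pyGetD hours (j : Int) 0, PySem.List.pyGetD hours (j : Int) 0 - 1].foldl
          (fun memory addable =>
            let new_time := PySem.Int.mod (time + addable) h
            let res : Int := if l ≤ new_time ∧ new_time ≤ r then 1 else 0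
            pvSet2 memory (j : Int) time
              (max (pvGet2 memory (j : Int) time) (pvGet2 memory ((j : Int) + 1) new_time + res)))
          memory)
      (pvTabP h l r L H j t)
    = pvTabP h l r L H j H := by
  have key : ∀ d t, t ≤ H → H - t = d →
      (PySem.List.pyRange (t : Int) h 1).foldl
        (fun memory time =>
          [PySem.List.pyGetD hours (j : Int) 0, PySem.List.pyGetD hours (j : Int) 0 - 1].foldl
            (fun memory addable =>
              let new_time := PySem.Int.mod (time + addable) h
              let res : Int := if l ≤ new_time ∧ new_time ≤ r then 1 else 0
              pvSet2 memory (j : Int) time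
                (max (pvGet2 memory (j : Int) time) (pvGet2 memory ((j : Int) + 1) new_time + res)))
            memory)
        (pvTabP h l r L H j t)
      = pvTabP h l r L H j H := by
    intro d
    induction d with
    | zero =>
        intro t h1 h2
        have ht : t = H := by omega
        subst ht
        rw [PySem.List.pyRange_one_eq_nil (by omega), List.foldl_nil]
    | succ d ih =>
        intro t h1 h2
        have htH : t < H := by omega
        have htH' : (t : Int) < h := by omega
        rw [PySem.List.pyRange_one_cons htH', List.foldl_cons]
        rw [pvStepTime h l r hours L H j t hj htH hH ha]
        rw [show ((t : Int) + 1) = ((t + 1 : Nat) : Int) by push_cast; ring]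
        exact ih (t + 1) (by omega) (by omega)
  intro t ht
  exact key (H - t) t ht rfl

theorem pvOuterFold (h l r : Int) (hours L : List Int) (H : Nat)
    (hH : (H : Int) = h)
    (ha : ∀ j (hj : j < L.length), PySem.List.pyGetD hours (j : Int) 0 = L[j]) :
    ∀ j, j ≤ L.length →
    (PySem.List.pyRange ((j : Int) - 1) (-1) (-1)).foldl
      (fun memory ind =>
        (PySem.List.pyRange 0 h 1).foldl (fun memory time =>
          [PySem.List.pyGetD hours ind 0, PySem.List.pyGetD hours ind 0 - 1].foldl
            (fun memory addable =>
              let new_time := PySem.Int.mod (time + addable) h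
              let res : Int := if l ≤ new_time ∧ new_time ≤ r then 1 else 0
              pvSet2 memory ind time
                (max (pvGet2 memory ind time) (pvGet2 memory (ind + 1) new_time + res)))
            memory)
          memory)
      (pvTab h l r L H j)
    = pvTab h l r L H 0 := by
  intro j
  induction j with
  | zero =>
      intro _
      rw [show ((0 : Nat) : Int) - 1 = -1 by norm_num,
        PySem.List.pyRange_neg_one_eq_nil (le_refl (-1)), List.foldl_nil]
  | succ j ih =>
      intro hjL
      rw [show (((j + 1 : Nat)) : Int) - 1 = (j : Int) by push_cast; ring,
        PySem.List.pyRange_neg_one_cons (show (-1 : Int) < (j : Int) by omega), List.foldl_cons]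
      have hstep := pvInnerFold h l r hours L H j (by omega) hH (ha j (by omega)) 0 (Nat.zero_le H)
      rw [pvTabP_zero h l r L H j] at hstep
      rw [Nat.cast_zero] at hstep
      rw [hstep, pvTabP_top h l r L H j]
      exact ih (by omega)

theorem pvA_eq (hours : List Int) (n h l r : Int)
    (hh : 1 ≤ h) (hn : 0 ≤ n) (hnl : n ≤ hours.length) :
    sleep_well hours n h l r = pvG h l r (hours.take n.toNat) 0 := by
  have hN : (n.toNat : Int) = n := Int.toNat_of_nonneg hn
  have hH : ((h.toNat : Nat) : Int) = h := Int.toNat_of_nonneg (by omega)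
  have hNlen : n.toNat ≤ hours.length := by omega
  have hLlen : (hours.take n.toNat).length = n.toNat := by
    rw [List.length_take]; omega
  have ha : ∀ j (hj : j < (hours.take n.toNat).length),
      PySem.List.pyGetD hours (j : Int) 0 = (hours.take n.toNat)[j] := by
    intro j hj
    rw [PySem.List.pyGetD_natCast, List.getD_eq_getElem hours 0 (by omega)]
    simp [List.getElem_take]
  simp only [sleep_well]
  have hinit : (PySem.List.pyRange 0 (n + 1) 1).map (fun _ => PySem.List.pyRepeat [(0 : Int)] h)
      = pvTab h l r (hours.take n.toNat) h.toNat (hours.take n.toNat).length := by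
    rw [List.map_const', PySem.List.length_pyRange_one, PySem.List.pyRepeat_singleton]
    rw [show (n + 1 - 0).toNat = n.toNat + 1 by omega]
    unfold pvTab
    apply List.ext_getElem
    · simp [hLlen]
    · intro k hk1 hk2
      simp only [List.length_replicate] at hk1
      rw [List.getElem_replicate, List.getElem_map, List.getElem_range]
      by_cases hkN : (hours.take n.toNat).length ≤ k
      · rw [if_pos hkN]
        have hk : k = (hours.take n.toNat).length := by
          simp only [List.length_map, List.length_range] at hk2; omega
        rw [hk, List.drop_length, pvGRow_nil]
        rfl
      · rw [if_neg hkN]; rfl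
  rw [hinit]
  rw [show n - 1 = ((hours.take n.toNat).length : Int) - 1 by rw [hLlen]; omega]
  rw [pvOuterFold h l r hours (hours.take n.toNat) h.toNat hH ha (hours.take n.toNat).length (le_refl _)]
  rw [show (0 : Int) = ((0 : Nat) : Int) by simp]
  unfold pvTab
  rw [pvGet2_map_range _ _ _ _ (by omega)]
  simp only [Nat.le_refl, if_pos]
  rw [pvGRow_getD h l r _ h.toNat _ (by simp) (by simp; omega)]
  simp

-- ---------- B side ----------

def pvW (h l r : Int) (s : List Int) (P : Int) : Int → List Int → List Int
  | _, [] => []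
  | k, v :: vs => (v + pvG h l r s (PySem.Int.mod (P - k) h)) :: pvW h l r s P (k + 1) vs

def pvM : List Int → Int
  | [] => 0
  | x :: xs => xs.foldl max x

theorem pv_foldl_max_le (xs : List Int) (a c : Int) (h1 : a ≤ c) (h2 : ∀ x ∈ xs, x ≤ c) :
    xs.foldl max a ≤ c := by
  induction xs generalizing a with
  | nil => simpa using h1
  | cons y ys ih =>
      simp only [List.foldl_cons]
      exact ih (max a y) (by have := h2 y (by simp); omega) (fun x hx => h2 x (by simp [hx]))

theorem pv_le_foldl_max (xs : List Int) (a : Int) : a ≤ xs.foldl max a := by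
  induction xs generalizing a with
  | nil => simp
  | cons y ys ih => exact le_trans (le_max_left a y) (ih (max a y))

theorem pvM_mem_le (xs : List Int) (x : Int) (hx : x ∈ xs) : x ≤ pvM xs := by
  match xs, hx with
  | y :: ys, hx =>
    simp only [pvM]
    rcases List.mem_cons.mp hx with h | h
    · subst h; exact pv_le_foldl_max ys x
    · clear hx
      induction ys generalizing y with
      | nil => simp at h
      | cons z zs ih =>
          simp only [List.foldl_cons]
          rcases List.mem_cons.mp h with h' | h'
          · subst h'; exact le_trans (le_max_right y x) (pv_le_foldl_max zs _)
          · exact ih (max y z) h'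

theorem pvM_le (xs : List Int) (c : Int) (hne : xs ≠ []) (hb : ∀ x ∈ xs, x ≤ c) : pvM xs ≤ c := by
  match xs with
  | y :: ys =>
    simp only [pvM]
    exact pv_foldl_max_le ys y c (hb y (by simp)) (fun x hx => hb x (by simp [hx]))

theorem pvW_length (h l r : Int) (s : List Int) (P k : Int) (dp : List Int) :
    (pvW h l r s P k dp).length = dp.length := by
  induction dp generalizing k with
  | nil => rfl
  | cons v vs ih => simp [pvW, ih]

theorem pvW_getElem (h l r : Int) (s : List Int) (P k : Int) (dp : List Int)
    (j : Nat) (hj : j < dp.length) :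
    (pvW h l r s P k dp)[j]'(by rw [pvW_length]; exact hj)
      = dp[j] + pvG h l r s (PySem.Int.mod (P - (k + j)) h) := by
  induction dp generalizing k j with
  | nil => simp at hj
  | cons v vs ih =>
      cases j with
      | zero => simp [pvW]
      | succ j' =>
          simp only [pvW, List.getElem_cons_succ]
          rw [ih (k + 1) j' (by simpa using Nat.lt_of_succ_lt_succ hj)]
          congr 2
          push_cast; ring

theorem pvW_nil (h l r P k : Int) (dp : List Int) : pvW h l r [] P k dp = dp := by
  induction dp generalizing k with
  | nil => rfl
  | cons v vs ih => simp [pvW, pvG, ih]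

theorem pvStepB (h l r a P : Int) (s : List Int) (dp : List Int) (i : Nat)
    (hlen : dp.length = i + 1) (hh : 1 ≤ h) :
    pvM (pvW h l r s (P + a) 0 ((PySem.List.pyRange 0 ((i : Int) + 2) 1).map (fun k =>
        max (PySem.List.pyGetD dp (max (k - 1) 0) 0) (PySem.List.pyGetD dp (min k (i : Int)) 0)
          + (if l ≤ PySem.Int.mod (P + a - k) h ∧ PySem.Int.mod (P + a - k) h ≤ r then (1 : Int) else 0))))
    = pvM (pvW h l r (a :: s) P 0 dp) := by
  have hh0 : (0 : Int) < h := by omega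
  set dp' := (PySem.List.pyRange 0 ((i : Int) + 2) 1).map (fun k =>
      max (PySem.List.pyGetD dp (max (k - 1) 0) 0) (PySem.List.pyGetD dp (min k (i : Int)) 0)
        + (if l ≤ PySem.Int.mod (P + a - k) h ∧ PySem.Int.mod (P + a - k) h ≤ r then (1 : Int) else 0)) with hdp'
  have hlen' : dp'.length = i + 2 := by
    rw [hdp', List.length_map, PySem.List.length_pyRange_one]; omega
  have hget' : ∀ (k : Nat) (hk : k < i + 2),
      dp'[k]'(by omega) =
        max (dp[k - 1]'(by omega)) (dp[min k i]'(by omega))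
          + pvR l r (PySem.Int.mod (P + a - (k : Int)) h) := by
    intro k hk
    simp only [hdp', List.getElem_map]
    rw [List.getElem_of_eq (PySem.List.pyRange_one 0 ((i : Int) + 2)) (by simp; omega),
      List.getElem_map, List.getElem_range]
    simp only [zero_add]
    rw [PySem.List.pyGetD_eq_getElem dp 0 (le_max_right _ _) (by rw [hlen]; omega),
      PySem.List.pyGetD_eq_getElem dp 0 (le_min (by omega) (by omega)) (by rw [hlen]; push_cast; omega)]
    simp only [show (max ((k : Int) - 1) 0).toNat = k - 1 by omega,
      show (min ((k : Int)) ((i : Int))).toNat = min k i by omega]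
    rfl
  have hw1 : ∀ (k : Nat) (hk : k < i + 2),
      (pvW h l r s (P + a) 0 dp')[k]'(by rw [pvW_length]; omega)
        = dp'[k]'(by omega) + pvG h l r s (PySem.Int.mod (P + a - (k : Int)) h) := by
    intro k hk
    rw [pvW_getElem h l r s (P + a) 0 dp' k (by omega)]
    norm_num
  have hw2 : ∀ (j : Nat) (hj : j < i + 1),
      (pvW h l r (a :: s) P 0 dp)[j]'(by rw [pvW_length]; omega)
        = dp[j]'(by omega) + pvG h l r (a :: s) (PySem.Int.mod (P - (j : Int)) h) := by
    intro j hj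
    rw [pvW_getElem h l r (a :: s) P 0 dp j (by omega)]
    norm_num
  have hexp : ∀ (j : Nat), pvG h l r (a :: s) (PySem.Int.mod (P - (j : Int)) h)
      = max (pvG h l r s (PySem.Int.mod (P + a - (j : Int)) h) + pvR l r (PySem.Int.mod (P + a - (j : Int)) h))
            (pvG h l r s (PySem.Int.mod (P + (a - 1) - (j : Int)) h) + pvR l r (PySem.Int.mod (P + (a - 1) - (j : Int)) h)) := by
    intro j
    simp only [pvG]
    rw [pv_mod_add h (P - (j : Int)) a hh, pv_mod_add h (P - (j : Int)) (a - 1) hh,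
      show P - (j : Int) + a = P + a - (j : Int) from by ring,
      show P - (j : Int) + (a - 1) = P + (a - 1) - (j : Int) from by ring]
  have key2 : ∀ (j : Nat) (hj : j < i + 1) (u : Int),
      (u = PySem.Int.mod (P + a - (j : Int)) h ∨ u = PySem.Int.mod (P + (a - 1) - (j : Int)) h) →
      dp[j]'(by omega) + (pvG h l r s u + pvR l r u) ≤ pvM (pvW h l r (a :: s) P 0 dp) := by
    intro j hj u hu
    refine le_trans ?_ (pvM_mem_le _ _
      (List.getElem_mem (l := pvW h l r (a :: s) P 0 dp) (n := j) (by rw [pvW_length]; omega)))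
    rw [hw2 j hj, hexp j]
    rcases hu with rfl | rfl
    · have := le_max_left
        (pvG h l r s (PySem.Int.mod (P + a - (j : Int)) h) + pvR l r (PySem.Int.mod (P + a - (j : Int)) h))
        (pvG h l r s (PySem.Int.mod (P + (a - 1) - (j : Int)) h) + pvR l r (PySem.Int.mod (P + (a - 1) - (j : Int)) h))
      linarith
    · have := le_max_right
        (pvG h l r s (PySem.Int.mod (P + a - (j : Int)) h) + pvR l r (PySem.Int.mod (P + a - (j : Int)) h))
        (pvG h l r s (PySem.Int.mod (P + (a - 1) - (j : Int)) h) + pvR l r (PySem.Int.mod (P + (a - 1) - (j : Int)) h))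
      linarith
  have key1 : ∀ (k : Nat) (hk : k < i + 2) (j : Nat) (hj : j < i + 1),
      (j = k - 1 ∨ j = min k i) →
      dp[j]'(by omega) + (pvG h l r s (PySem.Int.mod (P + a - (k : Int)) h) + pvR l r (PySem.Int.mod (P + a - (k : Int)) h))
        ≤ pvM (pvW h l r s (P + a) 0 dp') := by
    intro k hk j hj hjk
    refine le_trans ?_ (pvM_mem_le _ _
      (List.getElem_mem (l := pvW h l r s (P + a) 0 dp') (n := k) (by rw [pvW_length, hlen']; omega)))
    rw [hw1 k hk, hget' k hk]
    have hb : dp[j]'(by omega) ≤ max (dp[k - 1]'(by omega)) (dp[min k i]'(by omega)) := by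
      rcases hjk with rfl | rfl
      · exact le_max_left _ _
      · exact le_max_right _ _
    linarith
  apply le_antisymm
  · apply pvM_le _ _ (List.ne_nil_of_length_pos (by rw [pvW_length, hlen']; omega))
    intro x hx
    obtain ⟨k, hk, hkeq⟩ := List.mem_iff_getElem.mp hx
    rw [pvW_length, hlen'] at hk
    rw [← hkeq, hw1 k hk, hget' k hk]
    rcases max_cases (dp[k - 1]'(by omega)) (dp[min k i]'(by omega)) with ⟨hmax, _⟩ | ⟨hmax, _⟩ <;> rw [hmax]
    · by_cases hk0 : k = 0
      · subst hk0
        have h2 := key2 0 (by omega) _ (Or.inl rfl)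
        rw [show ((0 : Nat) : Int) = ((0 : Nat) : Int) from rfl] at h2
        simp only [Nat.zero_sub] at *
        linarith
      · have h2 := key2 (k - 1) (by omega) _ (Or.inr rfl)
        rw [show P + (a - 1) - ((k - 1 : Nat) : Int) = P + a - (k : Int) by omega] at h2
        linarith
    · by_cases hki : k ≤ i
      · have h2 := key2 k (by omega) _ (Or.inl rfl)
        simp only [show min k i = k from by omega]
        linarith
      · have h2 := key2 i (by omega) _ (Or.inr rfl)
        rw [show P + (a - 1) - ((i : Nat) : Int) = P + a - (k : Int) by omega] at h2
        simp only [show min k i = i from by omega]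
        linarith
  · apply pvM_le _ _ (List.ne_nil_of_length_pos (by rw [pvW_length, hlen]; omega))
    intro x hx
    obtain ⟨j, hj, hjeq⟩ := List.mem_iff_getElem.mp hx
    rw [pvW_length, hlen] at hj
    rw [← hjeq, hw2 j hj, hexp j]
    rcases max_cases
        (pvG h l r s (PySem.Int.mod (P + a - (j : Int)) h) + pvR l r (PySem.Int.mod (P + a - (j : Int)) h))
        (pvG h l r s (PySem.Int.mod (P + (a - 1) - (j : Int)) h) + pvR l r (PySem.Int.mod (P + (a - 1) - (j : Int)) h))
      with ⟨hmax, _⟩ | ⟨hmax, _⟩ <;> rw [hmax]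
    · have h1 := key1 j (by omega) j (by omega) (Or.inr (by omega))
      linarith
    · have h1 := key1 (j + 1) (by omega) j (by omega) (Or.inl (by omega))
      rw [show P + a - ((j + 1 : Nat) : Int) = P + (a - 1) - (j : Int) by omega] at h1
      linarith

-- forward DP lists: pvDP i = the best-count list over k (number of reductions) after i steps
def pvDP (h l r : Int) (L : List Int) : Nat → List Int
  | 0 => [0]
  | i + 1 =>
      (PySem.List.pyRange 0 ((i : Int) + 2) 1).map (fun k =>
        max (PySem.List.pyGetD (pvDP h l r L i) (max (k - 1) 0) 0)
            (PySem.List.pyGetD (pvDP h l r L i) (min k (i : Int)) 0)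
          + (if l ≤ PySem.Int.mod ((L.take (i + 1)).sum - k) h ∧ PySem.Int.mod ((L.take (i + 1)).sum - k) h ≤ r then (1 : Int) else 0))

theorem pvDP_length (h l r : Int) (L : List Int) : ∀ i, (pvDP h l r L i).length = i + 1 := by
  intro i
  cases i with
  | zero => rfl
  | succ i =>
      simp only [pvDP, List.length_map, PySem.List.length_pyRange_one]
      omega

theorem pv_pyGetD_nonneg (xs : List Int) (i : Int) (hxs : ∀ x ∈ xs, 0 ≤ x) :
    0 ≤ PySem.List.pyGetD xs i 0 := by
  by_cases hin : PySem.Raise.InRange xs.length i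
  · exact hxs _ (PySem.List.pyGetD_mem xs 0 hin)
  · rw [PySem.List.pyGetD_of_none xs i 0 ((PySem.List.pyGet?_eq_none_iff xs i).mpr hin)]

theorem pvDP_nonneg (h l r : Int) (L : List Int) : ∀ i, ∀ x ∈ pvDP h l r L i, 0 ≤ x := by
  intro i
  induction i with
  | zero => intro x hx; simp only [pvDP, List.mem_singleton] at hx; omega
  | succ i ih =>
      intro x hx
      simp only [pvDP, List.mem_map] at hx
      obtain ⟨k, _, rfl⟩ := hx
      have h1 := pv_pyGetD_nonneg (pvDP h l r L i) (max (k - 1) 0) ih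
      have h2 := pv_pyGetD_nonneg (pvDP h l r L i) (min k (i : Int)) ih
      split <;> omega

theorem pvDP_pot (h l r : Int) (L : List Int) (hh : 1 ≤ h) :
    ∀ i, i ≤ L.length →
      pvM (pvW h l r (L.drop i) ((L.take i).sum) 0 (pvDP h l r L i)) = pvG h l r L 0 := by
  intro i
  induction i with
  | zero =>
      intro _
      simp only [List.take_zero, List.sum_nil, List.drop_zero, pvDP]
      simp only [pvW, pvM, List.foldl_nil]
      rw [show (0 : Int) - 0 = 0 by ring, PySem.Int.mod_eq_emod_of_pos (by omega)]
      simp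
  | succ i ih =>
      intro hi1
      have hi : i < L.length := by omega
      have hpv := ih (by omega)
      rw [show L.drop i = L[i] :: L.drop (i + 1) from (List.getElem_cons_drop hi).symm] at hpv
      simp only [pvDP]
      rw [List.sum_take_succ L i hi]
      exact (pvStepB h l r (L[i]) ((L.take i).sum) (L.drop (i + 1)) (pvDP h l r L i) i
        (pvDP_length h l r L i) hh).trans hpv

-- the padded array the in-place port works on: entries k ≤ i hold pvDP i, the rest are still 0
def pvPad (h l r : Int) (L : List Int) (N i : Nat) : List Int :=
  (List.range (N + 1)).map (fun k =>
    if k ≤ i then PySem.List.pyGetD (pvDP h l r L i) (k : Int) 0 else 0)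

def pvPadP (h l r : Int) (L : List Int) (N i c : Nat) : List Int :=
  (List.range (N + 1)).map (fun k =>
    if k ≤ c then (if k ≤ i then PySem.List.pyGetD (pvDP h l r L i) (k : Int) 0 else 0)
    else if k ≤ i + 1 then PySem.List.pyGetD (pvDP h l r L (i + 1)) (k : Int) 0 else 0)

theorem pvPadP_top (h l r : Int) (L : List Int) (N i : Nat) :
    pvPadP h l r L N i (i + 1) = pvPad h l r L N i := by
  unfold pvPadP pvPad
  apply List.map_congr_left
  intro k _
  by_cases hk : k ≤ i + 1
  · rw [if_pos hk]
  · rw [if_neg hk, if_neg (by omega), if_neg (by omega)]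

theorem pv_good_read (h l r X : Int) (hh : 1 ≤ h) :
    PySem.List.pyGetD
        ((PySem.List.pyRange 0 h 1).map (fun t => if l ≤ t ∧ t ≤ r then (1 : Int) else 0))
        (PySem.Int.mod X h) 0
      = if l ≤ PySem.Int.mod X h ∧ PySem.Int.mod X h ≤ r then (1 : Int) else 0 :=
  PySem.List.pyGetD_map_pyRange_of_nonneg _ h _ 0
    (PySem.Int.mod_nonneg _ (by omega)) (PySem.Int.mod_lt _ (by omega))

-- reading pvDP (i+1) at a position 0 ≤ c ≤ i+1 unfolds to its defining formula
theorem pvDP_succ_read (h l r : Int) (L : List Int) (i c : Nat) (hc : c ≤ i + 1) :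
    PySem.List.pyGetD (pvDP h l r L (i + 1)) (c : Int) 0
      = max (PySem.List.pyGetD (pvDP h l r L i) (max ((c : Int) - 1) 0) 0)
            (PySem.List.pyGetD (pvDP h l r L i) (min (c : Int) (i : Int)) 0)
          + (if l ≤ PySem.Int.mod ((L.take (i + 1)).sum - (c : Int)) h ∧ PySem.Int.mod ((L.take (i + 1)).sum - (c : Int)) h ≤ r then (1 : Int) else 0) := by
  simp only [pvDP]
  rw [PySem.List.pyGetD_map_pyRange_of_nonneg _ _ _ 0 (by omega) (by omega)]

theorem pvInnerB (h l r : Int) (L : List Int) (N i : Nat) (hh : 1 ≤ h) (hiN : i < N) :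
    ∀ c, c ≤ i + 1 →
    (PySem.List.pyRange (c : Int) 0 (-1)).foldl (fun dp k =>
        PySem.List.pySetD dp k
          (max (PySem.List.pyGetD dp (k - 1) 0) (PySem.List.pyGetD dp k 0)
            + PySem.List.pyGetD
                ((PySem.List.pyRange 0 h 1).map (fun t => if l ≤ t ∧ t ≤ r then (1 : Int) else 0))
                (PySem.Int.mod ((L.take (i + 1)).sum - k) h) 0))
      (pvPadP h l r L N i c)
    = pvPadP h l r L N i 0 := by
  intro c
  induction c with
  | zero =>
      intro _
      rw [show ((0 : Nat) : Int) = 0 from rfl, PySem.List.pyRange_neg_one_eq_nil (le_refl 0),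
        List.foldl_nil]
  | succ c ih =>
      intro hc
      rw [PySem.List.pyRange_neg_one_cons (by omega : (0 : Int) < ((c + 1 : Nat) : Int)),
        List.foldl_cons]
      have hstep : PySem.List.pySetD (pvPadP h l r L N i (c + 1)) ((c + 1 : Nat) : Int)
          (max (PySem.List.pyGetD (pvPadP h l r L N i (c + 1)) (((c + 1 : Nat) : Int) - 1) 0)
               (PySem.List.pyGetD (pvPadP h l r L N i (c + 1)) ((c + 1 : Nat) : Int) 0)
            + PySem.List.pyGetD
                ((PySem.List.pyRange 0 h 1).map (fun t => if l ≤ t ∧ t ≤ r then (1 : Int) else 0))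
                (PySem.Int.mod ((L.take (i + 1)).sum - ((c + 1 : Nat) : Int)) h) 0)
          = pvPadP h l r L N i c := by
        have hcN : c + 1 < N + 1 := by omega
        have hP : pvPadP h l r L N i (c + 1) = (List.range (N + 1)).map (fun k =>
            if k ≤ c + 1 then (if k ≤ i then PySem.List.pyGetD (pvDP h l r L i) (k : Int) 0 else 0)
            else if k ≤ i + 1 then PySem.List.pyGetD (pvDP h l r L (i + 1)) (k : Int) 0 else 0) := rfl
        rw [pv_good_read h l r _ hh]
        rw [show (((c + 1 : Nat) : Int) - 1) = ((c : Nat) : Int) by push_cast; ring]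
        rw [hP]
        rw [PySem.List.pyGetD_natCast, PySem.List.pyGetD_natCast,
          PySem.List.getD_map_range _ (N + 1) c 0 (by omega),
          PySem.List.getD_map_range _ (N + 1) (c + 1) 0 hcN]
        rw [PySem.List.pySetD_natCast, pv_set_map_range (N + 1) (c + 1) _ _ hcN]
        unfold pvPadP
        apply List.map_congr_left
        intro k _
        by_cases hkc : k = c + 1
        · subst hkc
          rw [if_pos rfl, if_neg (by omega : ¬ c + 1 ≤ c), if_pos (by omega : c + 1 ≤ i + 1)]
          rw [pvDP_succ_read h l r L i (c + 1) (by omega)]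
          rw [show (max (((c + 1 : Nat) : Int) - 1) 0) = ((c : Nat) : Int) by omega]
          rw [if_pos (show c ≤ c + 1 by omega), if_pos (show c ≤ i by omega),
            if_pos (show c + 1 ≤ c + 1 by omega)]
          by_cases hci : c + 1 ≤ i
          · rw [if_pos hci,
              show (min (((c + 1 : Nat) : Int)) ((i : Int))) = ((c + 1 : Nat) : Int) by push_cast; omega]
          · rw [if_neg hci,
              show (min (((c + 1 : Nat) : Int)) ((i : Int))) = ((c : Nat) : Int) by push_cast; omega]
            have hnn : 0 ≤ PySem.List.pyGetD (pvDP h l r L i) ((c : Nat) : Int) 0 :=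
              pv_pyGetD_nonneg _ _ (pvDP_nonneg h l r L i)
            rw [max_self, max_eq_left hnn]
        · rw [if_neg hkc]
          by_cases hk1 : k ≤ c
          · rw [if_pos hk1, if_pos (by omega : k ≤ c + 1)]
          · rw [if_neg hk1, if_neg (by omega : ¬ k ≤ c + 1)]
      rw [hstep, show (((c + 1 : Nat) : Int) - 1) = ((c : Nat) : Int) by push_cast; ring]
      exact ih (by omega)

theorem pvStepOut (h l r : Int) (L : List Int) (N i : Nat) (hh : 1 ≤ h) (hiN : i < N) :
    PySem.List.pySetD (pvPadP h l r L N i 0) 0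
      (PySem.List.pyGetD (pvPadP h l r L N i 0) 0 0
        + PySem.List.pyGetD
            ((PySem.List.pyRange 0 h 1).map (fun t => if l ≤ t ∧ t ≤ r then (1 : Int) else 0))
            (PySem.Int.mod ((L.take (i + 1)).sum) h) 0)
    = pvPad h l r L N (i + 1) := by
  have hP : pvPadP h l r L N i 0 = (List.range (N + 1)).map (fun k =>
      if k ≤ 0 then (if k ≤ i then PySem.List.pyGetD (pvDP h l r L i) (k : Int) 0 else 0)
      else if k ≤ i + 1 then PySem.List.pyGetD (pvDP h l r L (i + 1)) (k : Int) 0 else 0) := rfl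
  rw [pv_good_read h l r _ hh]
  rw [hP]
  rw [PySem.List.pyGetD_zero, PySem.List.getD_map_range _ (N + 1) 0 0 (by omega)]
  rw [PySem.List.pySetD_of_nonneg (i := 0) _ _ (by omega)]
  simp only [Int.toNat_zero]
  rw [pv_set_map_range (N + 1) 0 _ _ (by omega)]
  unfold pvPad
  apply List.map_congr_left
  intro k _
  by_cases hk0 : k = 0
  · subst hk0
    rw [if_pos rfl, if_pos (by omega : 0 ≤ i + 1)]
    rw [pvDP_succ_read h l r L i 0 (by omega)]
    rw [show (max (((0 : Nat) : Int) - 1) 0) = ((0 : Nat) : Int) by simp,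
      show (min ((0 : Nat) : Int) ((i : Int))) = ((0 : Nat) : Int) by simp,
      max_self]
    rw [if_pos (le_refl (0 : Nat)), if_pos (by omega : 0 ≤ i)]
    rw [show ((L.take (i + 1)).sum - ((0 : Nat) : Int)) = (L.take (i + 1)).sum by push_cast; ring]
  · rw [if_neg hk0, if_neg (by omega : ¬ k ≤ 0)]

theorem pvB_fold (h l r : Int) (hours L : List Int) (N : Nat) (hh : 1 ≤ h) (hN : N = L.length)
    (ha : ∀ j (hj : j < L.length), PySem.List.pyGetD hours (j : Int) 0 = L[j]) :
    ∀ m, m ≤ L.length →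
    (PySem.List.pyRange 0 (m : Int) 1).foldl (fun (st : Int × List Int) i =>
        let pref := st.1 + PySem.List.pyGetD hours i 0
        let dp := (PySem.List.pyRange (i + 1) 0 (-1)).foldl (fun dp k =>
            PySem.List.pySetD dp k
              (max (PySem.List.pyGetD dp (k - 1) 0) (PySem.List.pyGetD dp k 0)
                + PySem.List.pyGetD
                    ((PySem.List.pyRange 0 h 1).map (fun t => if l ≤ t ∧ t ≤ r then (1 : Int) else 0))
                    (PySem.Int.mod (pref - k) h) 0)) st.2
        let dp := PySem.List.pySetD dp 0
            (PySem.List.pyGetD dp 0 0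
              + PySem.List.pyGetD
                  ((PySem.List.pyRange 0 h 1).map (fun t => if l ≤ t ∧ t ≤ r then (1 : Int) else 0))
                  (PySem.Int.mod pref h) 0)
        (pref, dp))
      ((0 : Int), pvPad h l r L N 0)
    = ((L.take m).sum, pvPad h l r L N m) := by
  intro m
  induction m with
  | zero =>
      intro _
      rw [show ((0 : Nat) : Int) = 0 from rfl, PySem.List.pyRange_one_eq_nil (le_refl 0),
        List.foldl_nil]
      simp
  | succ m ih =>
      intro hm1
      have hm : m < L.length := by omega
      rw [show ((m + 1 : Nat) : Int) = (m : Int) + 1 by push_cast; ring,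
        PySem.List.pyRange_one_succ_right (by omega : (0 : Int) ≤ (m : Int)),
        List.foldl_append, ih (by omega), List.foldl_cons, List.foldl_nil]
      simp only [ha m hm]
      have hpref : (L.take m).sum + L[m] = (L.take (m + 1)).sum := (List.sum_take_succ L m hm).symm
      rw [hpref]
      have hinner := pvInnerB h l r L N m hh (by omega) (m + 1) (le_refl _)
      rw [pvPadP_top h l r L N m] at hinner
      rw [show ((m : Int) + 1) = ((m + 1 : Nat) : Int) by push_cast; ring, hinner,
        pvStepOut h l r L N m hh (by omega)]

theorem pvPad_full (h l r : Int) (L : List Int) (N : Nat) (hN : N = L.length) :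
    pvPad h l r L N N = pvDP h l r L N := by
  unfold pvPad
  apply List.ext_getElem
  · simp [pvDP_length]
  · intro k hk1 hk2
    simp only [List.length_map, List.length_range] at hk1
    rw [List.getElem_map, List.getElem_range, if_pos (by omega : k ≤ N)]
    rw [PySem.List.pyGetD_natCast, List.getD_eq_getElem _ _ (by rw [pvDP_length]; omega)]

theorem pvB_eq (hours : List Int) (n h l r : Int)
    (hh : 1 ≤ h) (hn : 0 ≤ n) (hnl : n ≤ hours.length) :
    sleep_well_alt hours n h l r = pvG h l r (hours.take n.toNat) 0 := by
  have hN : (n.toNat : Int) = n := Int.toNat_of_nonneg hn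
  have hNlen : n.toNat ≤ hours.length := by omega
  have hLlen : (hours.take n.toNat).length = n.toNat := by rw [List.length_take]; omega
  have ha : ∀ j (hj : j < (hours.take n.toNat).length),
      PySem.List.pyGetD hours (j : Int) 0 = (hours.take n.toNat)[j] := by
    intro j hj
    rw [PySem.List.pyGetD_natCast, List.getD_eq_getElem hours 0 (by omega)]
    simp [List.getElem_take]
  simp only [sleep_well_alt]
  have hinit : PySem.List.pyRepeat [(0 : Int)] (n + 1) = pvPad h l r (hours.take n.toNat) n.toNat 0 := by
    rw [PySem.List.pyRepeat_singleton]
    unfold pvPad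
    apply List.ext_getElem
    · simp; omega
    · intro k hk1 hk2
      simp only [List.length_replicate] at hk1
      rw [List.getElem_replicate, List.getElem_map, List.getElem_range]
      by_cases hk : k ≤ 0
      · rw [if_pos hk]
        have : k = 0 := by omega
        subst this
        rfl
      · rw [if_neg hk]
  rw [hinit,
    show PySem.List.pyRange 0 n 1 = PySem.List.pyRange 0 ((n.toNat : Nat) : Int) 1 by rw [hN]]
  rw [pvB_fold h l r hours (hours.take n.toNat) n.toNat hh hLlen.symm ha n.toNat (by omega)]
  rw [pvPad_full h l r (hours.take n.toNat) n.toNat hLlen.symm]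
  have hpv := pvDP_pot h l r (hours.take n.toNat) hh n.toNat (by omega)
  have hdrop : (hours.take n.toNat).drop n.toNat = [] := by
    apply List.drop_eq_nil_of_le
    rw [hLlen]
  rw [hdrop, pvW_nil] at hpv
  have hlen := pvDP_length h l r (hours.take n.toNat) n.toNat
  cases hdp : pvDP h l r (hours.take n.toNat) n.toNat with
  | nil => rw [hdp] at hlen; simp at hlen
  | cons x xs =>
      rw [hdp] at hpv
      simp only [PySem.List.max?_id_cons, Option.getD_some]
      simpa [pvM] using hpv

-- ===== VERDICT (by name: the statement is the Claim_ definition above) =====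
theorem sleep_well_spec : Claim_equal_sleep_well := by
  intro hours n h_ l r _ hpre
  obtain ⟨hh, hn, hnl⟩ := hpre
  have hlen : n ≤ (hours.length : Int) := by exact_mod_cast hnl
  unfold Spec_sleep_well
  rw [pvA_eq hours n h_ l r hh hn hlen, pvB_eq hours n h_ l r hh hn hlen]
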